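-- pv_equiv track=rewrite | github.com/makhidkarun/traveller_pyroute | PyRoute/DeltaDictionary.py | _partition_file
-- ===== SOURCE A (Python) =====
-- def _partition_file(lines):
--     """
--         Break lines out into headers section, which is retained, and starlines, which gets minimised later on
--         - this assumes downloaded-from-TravellerMap sector file
--     """
--     headers = []
--     starlines = []
--     isheader = True
--     for line in lines:
--         if isheader:
--             headers.append(line)
--             if line.startswith('----'):
--                 isheader = False
--         else:
--             starlines.append(line)
--     return headers, starlines
-- ===== SOURCE B (Python) =====
-- def _partition_file(lines):
--     lines = list(lines)
--     i = next((k for k, line in enumerate(lines) if line.startswith('----')), None)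
--     if i is None:
--         return lines, []
--     return lines[:i + 1], lines[i + 1:]
-- ===== Notes on version B (the rewrite author's own statement) =====
-- stated objective: idiomatic
-- what changed: B computes the index of the first '----' line once and returns the two sections by slicing, instead of A's flag-driven per-line appends into two accumulator lists.
import Mathlib
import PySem

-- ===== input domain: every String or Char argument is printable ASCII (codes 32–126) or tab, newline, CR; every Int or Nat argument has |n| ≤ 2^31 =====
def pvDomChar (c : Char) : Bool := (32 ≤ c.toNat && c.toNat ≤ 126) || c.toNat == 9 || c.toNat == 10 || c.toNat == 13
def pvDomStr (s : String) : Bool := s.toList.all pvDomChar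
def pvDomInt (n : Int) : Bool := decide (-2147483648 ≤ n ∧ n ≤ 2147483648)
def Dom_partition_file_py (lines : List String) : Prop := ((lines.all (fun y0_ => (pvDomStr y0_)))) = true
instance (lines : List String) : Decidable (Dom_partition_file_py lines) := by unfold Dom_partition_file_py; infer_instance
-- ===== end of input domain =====

-- B finds the first '----' boundary index and slices, instead of A's flag-driven per-line appends; same values on all inputs.
-- ===== PORT A =====
def partition_file_py (lines : List String) : List String × List String :=
  let st := lines.foldl
    (fun (s : List String × List String × Bool) line =>
      if s.2.2 then
        (s.1 ++ [line], s.2.1,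
          if PySem.Str.startswith line "----" then false else s.2.2)
      else
        (s.1, s.2.1 ++ [line], s.2.2))
    ([], [], true)
  (st.1, st.2.1)

-- ===== PORT B =====
def partition_file_py_alt (lines : List String) : List String × List String :=
  match lines.findIdx? (fun line => PySem.Str.startswith line "----") with
  | none => (lines, [])
  | some i => (lines.take (i + 1), lines.drop (i + 1))

-- ===== PRECONDITION & SPEC =====
def Spec_partition_file_py (lines : List String) (out : List String × List String) : Prop := out = partition_file_py_alt lines
instance (lines : List String) (out : List String × List String) : Decidable (Spec_partition_file_py lines out) := by unfold Spec_partition_file_py; infer_instance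

-- ===== CLAIM (what is proved, stated in full; the proofs are below) =====
def Claim_equal_partition_file_py : Prop := ∀ (lines : List String), Dom_partition_file_py lines → Spec_partition_file_py lines (partition_file_py lines)

-- ===== LEMMAS AND PROOFS =====

def pvStepA (s : List String × List String × Bool) (line : String) :
    List String × List String × Bool :=
  if s.2.2 then
    (s.1 ++ [line], s.2.1,
      if PySem.Str.startswith line "----" then false else s.2.2)
  else
    (s.1, s.2.1 ++ [line], s.2.2)

theorem foldA_false (lines : List String) (h s : List String) :
    lines.foldl pvStepA (h, s, false) = (h, s ++ lines, false) := by
  induction lines generalizing s with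
  | nil => simp
  | cons x xs ih =>
      simp only [List.foldl_cons, pvStepA]
      simpa using ih (s ++ [x])

theorem foldA_true (lines : List String) (h s : List String) :
    lines.foldl pvStepA (h, s, true) =
      match lines.findIdx? (fun line => PySem.Str.startswith line "----") with
      | none => (h ++ lines, s, true)
      | some i => (h ++ lines.take (i + 1), s ++ lines.drop (i + 1), false) := by
  induction lines generalizing h with
  | nil => simp
  | cons x xs ih =>
      by_cases hx : PySem.Chars.startswith x.toList ['-', '-', '-', '-'] = true
      · simp [pvStepA, hx, foldA_false, List.findIdx?_cons]
      · have hx' : PySem.Chars.startswith x.toList ['-', '-', '-', '-'] = false :=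
          Bool.eq_false_iff.mpr hx
        simp only [List.foldl_cons]
        have hstep : pvStepA (h, s, true) x = (h ++ [x], s, true) := by
          simp [pvStepA, hx']
        have hfun : (fun line => PySem.Str.startswith line "----")
            = (fun line => PySem.Chars.startswith line.toList ['-', '-', '-', '-']) := by
          funext l; simp
        rw [hstep, ih (h ++ [x])]
        rw [hfun]
        cases hfi : xs.findIdx? (fun line => PySem.Chars.startswith line.toList ['-', '-', '-', '-']) with
        | none => simp [List.findIdx?_cons, hx, hfi]
        | some i => simp [List.findIdx?_cons, hx, hfi, List.take_succ_cons, List.drop_succ_cons]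

-- ===== VERDICT (by name: the statement is the Claim_ definition above) =====
theorem partition_file_py_spec : Claim_equal_partition_file_py := by
  intro lines _
  show partition_file_py lines = partition_file_py_alt lines
  unfold partition_file_py partition_file_py_alt
  have : (fun (s : List String × List String × Bool) line =>
      if s.2.2 then
        (s.1 ++ [line], s.2.1,
          if PySem.Str.startswith line "----" then false else s.2.2)
      else
        (s.1, s.2.1 ++ [line], s.2.2)) = pvStepA := rfl
  rw [this, foldA_true lines [] []]
  cases hfi : lines.findIdx? (fun line => PySem.Str.startswith line "----") with
  | none => simp
  | some i => simp
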